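-- pv_equiv track=rewrite | github.com/sortai/markov.py | bldup.py | bldup
-- ===== SOURCE A (Python) =====
-- def bldup(x, s=1, loop=True):
--     l = len(x)
--     for i in range(l):
--         if i>=l-s:
--             if loop:
--                 yield (x[i:i+s]+x[0:i+s-l],x[i+1:i+s+1]+x[0:i+s-l+1])
--             else: break
--         else: yield (x[i:i+s],x[i+1:i+s+1])
-- ===== SOURCE B (Python) =====
-- def bldup(x, s=1, loop=True):
--     # one uniform slicing pass over a prebuilt wrapped buffer; no per-iteration branching
--     l = len(x)
--     t = max(s, 0)
--     xe = x + x[:t] if loop else x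
--     n = l if loop else max(l - t, 0)
--     for i in range(n):
--         yield (xe[i:i+s], xe[i+1:i+s+1])
-- ===== Notes on version B (the rewrite author's own statement) =====
-- stated objective: simpler
-- what changed: B precomputes a wrapped buffer xe = x + x[:max(s,0)] once and emits one uniform slice pair per index over a precomputed range, eliminating A's per-iteration boundary branch, the break, and the in-loop wraparound concatenation.
import Mathlib
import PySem

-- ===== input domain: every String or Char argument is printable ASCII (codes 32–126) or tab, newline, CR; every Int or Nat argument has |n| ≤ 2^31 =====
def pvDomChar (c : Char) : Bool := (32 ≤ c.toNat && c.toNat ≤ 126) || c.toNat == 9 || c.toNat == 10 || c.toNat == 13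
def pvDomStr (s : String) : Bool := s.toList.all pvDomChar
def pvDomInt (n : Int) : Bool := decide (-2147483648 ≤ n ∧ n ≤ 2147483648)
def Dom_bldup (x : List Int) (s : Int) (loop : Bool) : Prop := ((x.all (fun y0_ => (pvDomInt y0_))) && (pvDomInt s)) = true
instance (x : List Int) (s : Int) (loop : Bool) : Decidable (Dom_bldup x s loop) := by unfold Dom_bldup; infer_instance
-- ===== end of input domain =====

-- B removes A's per-iteration boundary branch by slicing one prebuilt wrapped buffer (simpler; return value of the generator = list of yields).


-- ===== PORT A =====
-- for i in range(l), with the break of the non-loop branch; i is the loop counter, fuel the remaining iterations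
def bldupAuxA (x : List Int) (s l : Int) (loop : Bool) : Nat → Nat → List (List Int × List Int)
  | _, 0 => []
  | i, fuel+1 =>
    if (i : Int) ≥ l - s then
      if loop then
        (PySem.List.slice x (some (i : Int)) (some ((i : Int) + s)) ++ PySem.List.slice x (some 0) (some ((i : Int) + s - l)),
         PySem.List.slice x (some ((i : Int) + 1)) (some ((i : Int) + s + 1)) ++ PySem.List.slice x (some 0) (some ((i : Int) + s - l + 1)))
        :: bldupAuxA x s l loop (i+1) fuel
      else []
    else
      (PySem.List.slice x (some (i : Int)) (some ((i : Int) + s)),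
       PySem.List.slice x (some ((i : Int) + 1)) (some ((i : Int) + s + 1)))
      :: bldupAuxA x s l loop (i+1) fuel

def bldup (x : List Int) (s : Int) (loop : Bool) : List (List Int × List Int) :=
  let l : Int := x.length
  bldupAuxA x s l loop 0 x.length

-- ===== PORT B =====
def bldup_alt (x : List Int) (s : Int) (loop : Bool) : List (List Int × List Int) :=
  let l : Int := x.length
  let t : Int := max s 0
  let xe : List Int := if loop then x ++ PySem.List.slice x (some 0) (some t) else x
  let n : Int := if loop then l else max (l - t) 0
  (PySem.List.pyRange 0 n 1).map (fun i =>
    (PySem.List.slice xe (some i) (some (i + s)),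
     PySem.List.slice xe (some (i + 1)) (some (i + s + 1))))

-- ===== PRECONDITION & SPEC =====
def Spec_bldup (x : List Int) (s : Int) (loop : Bool) (out : List (List Int × List Int)) : Prop := out = bldup_alt x s loop
instance (x : List Int) (s : Int) (loop : Bool) (out : List (List Int × List Int)) : Decidable (Spec_bldup x s loop out) := by unfold Spec_bldup; infer_instance

-- ===== CLAIM (what is proved, stated in full; the proofs are below) =====
def Claim_equal_bldup : Prop := ∀ (x : List Int) (s : Int) (loop : Bool), Dom_bldup x s loop → Spec_bldup x s loop (bldup x s loop)

-- ===== LEMMAS AND PROOFS =====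

-- slicing within the left part of an append ignores the right part
theorem pv_slice_app_inside (x y : List Int) (a b : Nat) (hb : b ≤ x.length) :
    PySem.List.slice (x ++ y) (some (a : Int)) (some (b : Int))
      = PySem.List.slice x (some (a : Int)) (some (b : Int)) := by
  rw [PySem.List.slice_natCast, PySem.List.slice_natCast, List.drop_append,
      List.take_append_of_le_length (by simp; omega)]

-- a slice crossing the append boundary wraps into the right part
theorem pv_slice_app_wrap (x y : List Int) (a b : Nat) (ha : a ≤ x.length) (hb : x.length ≤ b) :
    PySem.List.slice (x ++ y) (some (a : Int)) (some (b : Int))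
      = PySem.List.slice x (some (a : Int)) (some (b : Int)) ++ y.take (b - x.length) := by
  rw [PySem.List.slice_natCast, PySem.List.slice_natCast, List.drop_append,
      List.take_append]
  have h1 : a - x.length = 0 := by omega
  have h2 : (x.drop a).take (b - a) = x.drop a := List.take_of_length_le (by simp; omega)
  rw [h1, List.drop_zero, h2]
  have h3 : b - a - (x.drop a).length = b - x.length := by simp; omega
  rw [h3]

theorem pv_slice_zero_nat (x : List Int) (c : Nat) :
    PySem.List.slice x (some 0) (some (c : Int)) = x.take c := by
  have h0 : ((0 : Nat) : Int) = (0 : Int) := rfl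
  rw [← h0, PySem.List.slice_natCast]
  simp

-- main loop invariant: A's remaining loop from counter i equals B's remaining map
theorem pv_main (x : List Int) (s : Int) (loop : Bool)
    (xe : List Int) (n : Int)
    (hxe : xe = if loop then x ++ PySem.List.slice x (some 0) (some (max s 0)) else x)
    (hn : n = if loop then (x.length : Int) else max ((x.length : Int) - max s 0) 0) :
    ∀ (k i : Nat), (i : Int) + k = (x.length : Int) →
      bldupAuxA x s (x.length : Int) loop i k
        = (PySem.List.pyRange (i : Int) n 1).map (fun j =>
            (PySem.List.slice xe (some j) (some (j + s)),
             PySem.List.slice xe (some (j + 1)) (some (j + s + 1)))) := by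
  intro k
  induction k with
  | zero =>
      intro i hi
      have hni : n ≤ (i : Int) := by
        rcases loop with _ | _ <;> simp only [if_true, if_false, Bool.false_eq_true] at hn <;> simp [hn] <;> omega
      rw [PySem.List.pyRange_one_eq_nil hni]
      rfl
  | succ k ih =>
      intro i hi
      have hil : (i : Int) < (x.length : Int) := by
        have : ((k+1 : Nat) : Int) ≥ 1 := by push_cast; omega
        omega
      have htailc : ((i + 1 : Nat) : Int) = (i : Int) + 1 := by push_cast; ring
      by_cases hcond : (i : Int) ≥ (x.length : Int) - s
      · -- boundary region, only reachable with s > 0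
        have hs : 0 < s := by omega
        obtain ⟨m, hm⟩ : ∃ m : Nat, (m : Int) = s := ⟨s.toNat, Int.toNat_of_nonneg (by omega)⟩
        have hmax : max s 0 = (m : Int) := by omega
        rcases loop with _ | _
        · -- loop = false: A breaks; B's remaining range is empty
          have hni : n ≤ (i : Int) := by
            simp only [Bool.false_eq_true, if_false] at hn; omega
          rw [PySem.List.pyRange_one_eq_nil hni]
          simp [bldupAuxA, hcond]
        · -- loop = true: the wraparound element
          simp only [if_true] at hxe hn
          have hxe' : xe = x ++ x.take m := by rw [hxe, hmax, pv_slice_zero_nat]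
          have hin : (i : Int) < n := by omega
          rw [PySem.List.pyRange_one_cons hin, List.map_cons]
          simp only [bldupAuxA]
          rw [if_pos hcond, if_pos trivial]
          have key : ∀ (a c : Nat), a ≤ x.length → x.length ≤ a + m → c = a + m - x.length →
              PySem.List.slice xe (some (a : Int)) (some ((a : Int) + s))
                = PySem.List.slice x (some (a : Int)) (some ((a : Int) + s))
                  ++ PySem.List.slice x (some 0) (some ((c : Nat) : Int)) := by
            intro a c ha hb hc
            have e : (a : Int) + s = ((a + m : Nat) : Int) := by push_cast; omega
            rw [e, hxe', pv_slice_app_wrap x (x.take m) a (a + m) ha hb,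
                pv_slice_zero_nat, List.take_take]
            congr 2
            omega
          have h1 := key i (i + m - x.length) (by omega) (by omega) rfl
          have h2 := key (i + 1) (i + 1 + m - x.length) (by omega) (by omega) rfl
          have e1 : (i : Int) + s - (x.length : Int) = ((i + m - x.length : Nat) : Int) := by push_cast; omega
          have e2' : (i : Int) + s + 1 = (i : Int) + 1 + s := by ring
          have e3 : (i : Int) + s - (x.length : Int) + 1 = ((i + 1 + m - x.length : Nat) : Int) := by push_cast; omega
          rw [htailc] at h2
          rw [e3, e1, e2', ih (i + 1) (by push_cast; omega), htailc, h1, h2]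
      · -- interior element
        push_neg at hcond
        have hin : (i : Int) < n := by
          rcases loop with _ | _ <;> simp only [if_true, if_false, Bool.false_eq_true] at hn <;> omega
        rw [PySem.List.pyRange_one_cons hin, List.map_cons]
        simp only [bldupAuxA, ge_iff_le]
        rw [if_neg (by omega)]
        have hx_xe : ∀ (b : Int), 0 ≤ b → b ≤ (x.length : Int) →
            ∀ (a : Nat), PySem.List.slice xe (some (a : Int)) (some b) = PySem.List.slice x (some (a : Int)) (some b) := by
          intro b hb0 hbl a
          rcases loop with _ | _
          · simp only [Bool.false_eq_true, if_false] at hxe; rw [hxe]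
          · simp only [if_true] at hxe
            by_cases hs : s < 0
            · -- s < 0: the wrapped tail is empty, xe = x
              have hm0 : max s 0 = ((0 : Nat) : Int) := by simp; omega
              rw [hxe, hm0, pv_slice_zero_nat]
              simp
            · push_neg at hs
              obtain ⟨b', hb'⟩ : ∃ b' : Nat, (b' : Int) = b := ⟨b.toNat, Int.toNat_of_nonneg hb0⟩
              rw [hxe, ← hb', pv_slice_app_inside x _ a b' (by omega)]
        -- with 0 ≤ s both stops are within x; with s < 0 xe = x outright
        by_cases hs : 0 ≤ s
        · have h1 := hx_xe ((i : Int) + s) (by omega) (by omega) i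
          have h2 := hx_xe ((i : Int) + s + 1) (by omega) (by omega) (i + 1)
          rw [htailc] at h2
          rw [ih (i + 1) (by push_cast; omega), htailc, h1, h2]
        · -- s < 0: xe = x on both sides regardless of the stop
          have hxe'' : xe = x := by
            rcases loop with _ | _
            · simpa using hxe
            · simp only [if_true] at hxe
              have hm0 : max s 0 = ((0 : Nat) : Int) := by simp; omega
              rw [hxe, hm0, pv_slice_zero_nat]
              simp
          rw [ih (i + 1) (by push_cast; omega), htailc, hxe'']

-- ===== VERDICT (by name: the statement is the Claim_ definition above) =====
theorem bldup_spec : Claim_equal_bldup := by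
  intro x s loop _
  unfold Spec_bldup bldup bldup_alt
  exact pv_main x s loop _ _ rfl rfl x.length 0 (by simp)
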